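-- pv_equiv track=rewrite | github.com/LuisAVasquez/2022_AHP_internship | package/AHPtopicmodelling/utilities/utilities.py | get_clean_transcription
-- ===== SOURCE A (Python) =====
-- def get_clean_transcription(text):
--     """delete the "Apparat critique", "Notes", and "References" sections"""
--     delimiters = [
--         "\nRéférences\n",
--         "\nReferences\n",
--         "\nNotes\n",
--         "Apparat critique" ,
--         "Aparat critique",
--         ]
--     for delimiter in delimiters:
--         text = text.split(delimiter)[0]
--
--     return text
-- ===== SOURCE B (Python) =====
-- def _occurrences(text, d):
--     """all start positions of d in text, in increasing order"""
--     return [i for i in range(len(text)) if text.startswith(d, i)]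
--
-- def _earliest_fit(positions, width, cut):
--     """first position whose occurrence fits entirely inside text[:cut], else cut"""
--     for p in positions:
--         if p + width <= cut:
--             return p
--     return cut
--
-- def get_clean_transcription(text):
--     """delete the "Apparat critique", "Notes", and "References" sections"""
--     delimiters = [
--         "\nRéférences\n",
--         "\nReferences\n",
--         "\nNotes\n",
--         "Apparat critique",
--         "Aparat critique",
--     ]
--     # Phase 1: index every occurrence of every delimiter in the original text.
--     # Phase 2: resolve the sequential truncations purely arithmetically on those
--     # position lists, then slice the original text exactly once.
--     cut = len(text)
--     for d in delimiters:
--         cut = _earliest_fit(_occurrences(text, d), len(d), cut)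
--     return text[:cut]
-- ===== Notes on version B (the rewrite author's own statement) =====
-- stated objective: alternative
-- what changed: Instead of repeatedly splitting and reassigning a shrinking string, B first indexes every occurrence position of each delimiter in the original text, then resolves the sequential truncations purely arithmetically on those position lists (first occurrence that fits inside the surviving prefix), and slices the original text exactly once.
import Mathlib
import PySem

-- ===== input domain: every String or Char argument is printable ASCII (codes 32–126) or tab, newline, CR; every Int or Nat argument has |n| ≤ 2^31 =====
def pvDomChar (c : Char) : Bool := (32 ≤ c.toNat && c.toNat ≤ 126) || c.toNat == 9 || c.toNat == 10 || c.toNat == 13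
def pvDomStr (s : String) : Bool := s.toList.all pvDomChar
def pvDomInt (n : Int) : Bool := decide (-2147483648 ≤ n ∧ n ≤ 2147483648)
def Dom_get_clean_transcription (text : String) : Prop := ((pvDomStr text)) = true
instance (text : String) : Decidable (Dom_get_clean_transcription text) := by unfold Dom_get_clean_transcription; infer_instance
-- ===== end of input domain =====

-- B replaces A's repeated split-and-reassign on a shrinking string by an occurrence
-- index of each delimiter in the original text, an arithmetic resolution of the
-- sequential cuts over those position lists, and a single final slice (alternative
-- decomposition, same result; no speed claim).

-- ===== PORT A =====
def get_clean_transcription (text : String) : String :=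
  let delimiters : List String :=
    ["\nRéférences\n", "\nReferences\n", "\nNotes\n", "Apparat critique", "Aparat critique"]
  delimiters.foldl (fun t delimiter =>
    -- text = text.split(delimiter)[0]; splitting on a nonempty separator always yields a
    -- nonempty list, so both `none` fallbacks are unreachable
    match PySem.Str.split? t delimiter with
    | some parts =>
        match PySem.List.pyGet? parts 0 with
        | some piece => piece
        | none => t
    | none => t) text

-- ===== PORT B =====
-- [i for i in range(len(text)) if text.startswith(d, i)]
-- text.startswith(d, i) with 0 ≤ i < len(text) is exactly startswith on text[i:], ported
-- as Chars.startswith on toList.drop (exact on this range of i)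
def pvOccurrences (text d : String) : List Int :=
  (PySem.List.pyRange 0 (PySem.Str.len text) 1).filter
    (fun i => PySem.Chars.startswith (text.toList.drop i.toNat) d.toList)

-- for p in positions: if p + width <= cut: return p;  return cut
def pvEarliestFit : List Int → Int → Int → Int
  | [], _, cut => cut
  | p :: rest, width, cut => if p + width ≤ cut then p else pvEarliestFit rest width cut

def get_clean_transcription_alt (text : String) : String :=
  let delimiters : List String :=
    ["\nRéférences\n", "\nReferences\n", "\nNotes\n", "Apparat critique", "Aparat critique"]
  let cut : Int :=
    delimiters.foldl (fun cut d =>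
      pvEarliestFit (pvOccurrences text d) (PySem.Str.len d) cut) (PySem.Str.len text)
  PySem.Str.slice text none (some cut)

-- ===== PRECONDITION & SPEC =====  (A is total: no Pre_)
def Spec_get_clean_transcription (text : String) (out : String) : Prop := out = get_clean_transcription_alt text
instance (text : String) (out : String) : Decidable (Spec_get_clean_transcription text out) := by unfold Spec_get_clean_transcription; infer_instance

-- ===== CLAIM (what is proved, stated in full; the proofs are below) =====
def Claim_equal_get_clean_transcription : Prop := ∀ (text : String), Dom_get_clean_transcription text → Spec_get_clean_transcription text (get_clean_transcription text)

-- ===== LEMMAS AND PROOFS =====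

/-- The first piece of Python's `t.split(sep)`: everything before the first occurrence of
`sep`, or all of `t` when `sep` does not occur. -/
def pvFirstCut (sep l : List Char) : List Char :=
  if PySem.Chars.find l sep = -1 then l else l.take (PySem.Chars.find l sep).toNat

theorem pv_find_nil {sep : List Char} (h : sep ≠ []) : PySem.Chars.find [] sep = -1 := by
  rw [PySem.Chars.find_eq_neg_one_iff]
  simp [List.infix_nil, h]

theorem pv_find_zero {l sep : List Char} (h : sep.isPrefixOf l = true) :
    PySem.Chars.find l sep = 0 := by
  have hp : sep <+: l := List.isPrefixOf_iff_prefix.mp h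
  have hne : PySem.Chars.find l sep ≠ -1 :=
    (PySem.Chars.find_ne_neg_one_iff l sep).mpr hp.isInfix
  have h0 : 0 ≤ PySem.Chars.find l sep := by
    have := PySem.Chars.neg_one_le_find l sep; omega
  obtain ⟨-, hmin⟩ := PySem.Chars.find_spec h0
  by_contra hne0
  have hpos : (0:Nat) < (PySem.Chars.find l sep).toNat := by omega
  exact hmin 0 hpos (by simpa using hp)

theorem pv_find_cons {c : Char} {rest sep : List Char}
    (h : ¬ sep.isPrefixOf (c :: rest) = true) :
    PySem.Chars.find (c :: rest) sep =
      if PySem.Chars.find rest sep = -1 then -1 else PySem.Chars.find rest sep + 1 := by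
  have hnp : ¬ sep <+: (c :: rest) := fun hp => h (List.isPrefixOf_iff_prefix.mpr hp)
  by_cases hr : PySem.Chars.find rest sep = -1
  · rw [if_pos hr, PySem.Chars.find_eq_neg_one_iff]
    intro hinf
    obtain ⟨j, hj⟩ := (PySem.Chars.exists_prefix_drop_iff_isIn sep (c :: rest)).mpr
      ((PySem.Chars.isIn_iff_infix sep (c :: rest)).mpr hinf)
    cases j with
    | zero => exact hnp (by simpa using hj)
    | succ j =>
        rw [List.drop_succ_cons] at hj
        rw [PySem.Chars.find_eq_neg_one_iff] at hr
        exact hr ((PySem.Chars.isIn_iff_infix _ _).mp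
          ((PySem.Chars.exists_prefix_drop_iff_isIn sep rest).mp ⟨j, hj⟩))
  · rw [if_neg hr]
    have hr0 : 0 ≤ PySem.Chars.find rest sep := by
      have := PySem.Chars.neg_one_le_find rest sep; omega
    obtain ⟨hpre, hmin⟩ := PySem.Chars.find_spec hr0
    have hocc : sep <+: (c :: rest).drop ((PySem.Chars.find rest sep).toNat + 1) := by
      simpa [List.drop_succ_cons] using hpre
    have hinf : sep <:+: (c :: rest) :=
      (PySem.Chars.isIn_iff_infix _ _).mp
        ((PySem.Chars.exists_prefix_drop_iff_isIn sep (c :: rest)).mp ⟨_, hocc⟩)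
    have hne : PySem.Chars.find (c :: rest) sep ≠ -1 :=
      (PySem.Chars.find_ne_neg_one_iff _ _).mpr hinf
    have h0 : 0 ≤ PySem.Chars.find (c :: rest) sep := by
      have := PySem.Chars.neg_one_le_find (c :: rest) sep; omega
    obtain ⟨hpre', hmin'⟩ := PySem.Chars.find_spec h0
    have h1 : ¬ ((PySem.Chars.find (c :: rest) sep).toNat
        < (PySem.Chars.find rest sep).toNat + 1) := by
      intro hlt
      cases hn : (PySem.Chars.find (c :: rest) sep).toNat with
      | zero =>
          rw [hn] at hpre'
          exact hnp (by simpa using hpre')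
      | succ k =>
          rw [hn, List.drop_succ_cons] at hpre'
          exact hmin k (by omega) hpre'
    have h2 : ¬ ((PySem.Chars.find rest sep).toNat + 1
        < (PySem.Chars.find (c :: rest) sep).toNat) := fun hlt => hmin' _ hlt hocc
    omega

theorem pv_go_zero (sep l cur : List Char) (acc : List (List Char)) :
    PySem.Chars.splitOn.go sep 0 l cur acc = ((cur.reverse ++ l) :: acc).reverse := by
  rw [PySem.Chars.splitOn.go.eq_def]

theorem pv_go_nil (sep cur : List Char) (n : Nat) (acc : List (List Char)) :
    PySem.Chars.splitOn.go sep (n + 1) [] cur acc = (cur.reverse :: acc).reverse := by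
  rw [PySem.Chars.splitOn.go.eq_def]

theorem pv_go_cons (sep : List Char) (n : Nat) (c : Char) (rest cur : List Char)
    (acc : List (List Char)) :
    PySem.Chars.splitOn.go sep (n + 1) (c :: rest) cur acc =
      if sep.isPrefixOf (c :: rest) = true then
        PySem.Chars.splitOn.go sep n (List.drop sep.length (c :: rest)) [] (cur.reverse :: acc)
      else
        PySem.Chars.splitOn.go sep n rest (c :: cur) acc := by
  rw [PySem.Chars.splitOn.go.eq_def]

theorem pv_go_acc (sep : List Char) :
    ∀ (fuel : Nat) (l cur : List Char) (acc : List (List Char)),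
      PySem.Chars.splitOn.go sep fuel l cur acc =
        acc.reverse ++ PySem.Chars.splitOn.go sep fuel l cur [] := by
  intro fuel
  induction fuel with
  | zero =>
      intro l cur acc
      rw [pv_go_zero, pv_go_zero]
      simp
  | succ n ih =>
      intro l cur acc
      cases l with
      | nil =>
          rw [pv_go_nil, pv_go_nil]
          simp
      | cons c rest =>
          rw [pv_go_cons, pv_go_cons]
          by_cases hp : sep.isPrefixOf (c :: rest) = true
          · rw [if_pos hp, if_pos hp, ih _ _ (cur.reverse :: acc), ih _ _ [cur.reverse]]
            simp
          · rw [if_neg hp, if_neg hp, ih _ _ acc]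

theorem pv_go_head {sep : List Char} (hsep : sep ≠ []) :
    ∀ (fuel : Nat) (l cur : List Char), l.length < fuel →
      ∃ tl, PySem.Chars.splitOn.go sep fuel l cur [] =
        (cur.reverse ++ pvFirstCut sep l) :: tl := by
  intro fuel
  induction fuel with
  | zero => intro l cur h; omega
  | succ n ih =>
      intro l cur h
      cases l with
      | nil =>
          refine ⟨[], ?_⟩
          rw [pv_go_nil]
          simp [pvFirstCut, pv_find_nil hsep]
      | cons c rest =>
          rw [pv_go_cons]
          by_cases hp : sep.isPrefixOf (c :: rest) = true
          · rw [if_pos hp, pv_go_acc]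
            refine ⟨PySem.Chars.splitOn.go sep n (List.drop sep.length (c :: rest)) [] [], ?_⟩
            simp [pvFirstCut, pv_find_zero hp]
          · rw [if_neg hp]
            have hlen : rest.length < n := by
              simp only [List.length_cons] at h; omega
            obtain ⟨tl, htl⟩ := ih rest (c :: cur) hlen
            refine ⟨tl, ?_⟩
            rw [htl]
            have hkey : pvFirstCut sep (c :: rest) = c :: pvFirstCut sep rest := by
              unfold pvFirstCut
              rw [pv_find_cons hp]
              by_cases hr : PySem.Chars.find rest sep = -1
              · simp [hr]
              · have hr0 : 0 ≤ PySem.Chars.find rest sep := by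
                  have := PySem.Chars.neg_one_le_find rest sep; omega
                rw [if_neg hr, if_neg (by omega : ¬ PySem.Chars.find rest sep + 1 = -1),
                  if_neg hr]
                have htn : (PySem.Chars.find rest sep + 1).toNat
                    = (PySem.Chars.find rest sep).toNat + 1 := by omega
                rw [htn, List.take_succ_cons]
            rw [hkey]
            simp

theorem pv_splitOn_head {sep : List Char} (hsep : sep ≠ []) (l : List Char) :
    ∃ tl, PySem.Chars.splitOn l sep = pvFirstCut sep l :: tl := by
  obtain ⟨tl, htl⟩ := pv_go_head hsep (l.length + 1) l [] (by omega)
  refine ⟨tl, ?_⟩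
  rw [PySem.Chars.splitOn.eq_1, htl]
  simp

theorem pv_stepA {d : String} (hd : d.toList ≠ []) (t : String) :
    (match PySem.Str.split? t d with
      | some parts =>
          match PySem.List.pyGet? parts 0 with
          | some piece => piece
          | none => t
      | none => t).toList = pvFirstCut d.toList t.toList := by
  obtain ⟨tl, htl⟩ := pv_splitOn_head hd t.toList
  rw [PySem.Str.split?.eq_1, PySem.Chars.split?.eq_1, if_neg (by simpa [List.isEmpty_iff] using hd), htl]
  simp [PySem.List.pyGet?, PySem.List.pyIdx?]

-- membership in the occurrence index
theorem pv_mem_occ (text d : String) (i : Int) :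
    i ∈ pvOccurrences text d ↔
      0 ≤ i ∧ i < (text.toList.length : Int) ∧ d.toList <+: text.toList.drop i.toNat := by
  unfold pvOccurrences
  rw [List.mem_filter]
  simp only [PySem.List.mem_pyRange_one, PySem.Str.len_eq, PySem.Chars.startswith_iff]
  tauto

theorem pv_occ_sorted (text d : String) : (pvOccurrences text d).Pairwise (· < ·) :=
  List.Pairwise.filter _ (PySem.List.pairwise_lt_pyRange_one 0 (PySem.Str.len text))

theorem pv_fit_none {ps : List Int} {w c : Int} (h : ∀ p ∈ ps, ¬ p + w ≤ c) :
    pvEarliestFit ps w c = c := by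
  induction ps with
  | nil => rfl
  | cons p rest ih =>
      unfold pvEarliestFit
      rw [if_neg (h p (List.mem_cons_self))]
      exact ih (fun q hq => h q (List.mem_cons_of_mem _ hq))

theorem pv_fit_first {ps : List Int} {w c F : Int} (hs : ps.Pairwise (· < ·))
    (hmem : F ∈ ps) (hF : F + w ≤ c) (hmin : ∀ p ∈ ps, p < F → ¬ p + w ≤ c) :
    pvEarliestFit ps w c = F := by
  induction ps with
  | nil => cases hmem
  | cons p rest ih =>
      rcases List.mem_cons.mp hmem with heq | hrest
      · subst heq
        unfold pvEarliestFit
        rw [if_pos hF]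
      · have hplt : p < F := (List.pairwise_cons.mp hs).1 F hrest
        unfold pvEarliestFit
        rw [if_neg (hmin p (List.mem_cons_self) hplt)]
        exact ih (List.pairwise_cons.mp hs).2 hrest
          (fun q hq hlt => hmin q (List.mem_cons_of_mem _ hq) hlt)

/-- B's arithmetic step over the occurrence index equals the first-occurrence cut A
performs on the surviving prefix `text[:c]`. -/
theorem pv_earliest_eq (text d : String) (hd : d.toList ≠ []) (c : Int) (h0 : 0 ≤ c)
    (hle : c ≤ (text.toList.length : Int)) :
    pvEarliestFit (pvOccurrences text d) (PySem.Str.len d) c =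
      (if PySem.Chars.find (text.toList.take c.toNat) d.toList = -1 then c
       else PySem.Chars.find (text.toList.take c.toNat) d.toList) := by
  set l := text.toList with hl
  have hdpos : 0 < d.toList.length := List.length_pos_iff.mpr hd
  by_cases hF : PySem.Chars.find (l.take c.toNat) d.toList = -1
  · rw [if_pos hF]
    apply pv_fit_none
    intro p hp hpc
    obtain ⟨hp0, hplen, hpre⟩ := (pv_mem_occ text d p).mp hp
    rw [PySem.Chars.find_eq_neg_one_iff] at hF
    apply hF
    have hfit : d.toList <+: (l.take c.toNat).drop p.toNat := by
      rw [List.drop_take]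
      exact List.prefix_take_iff.mpr ⟨hpre, by
        rw [PySem.Str.len_eq] at hpc; omega⟩
    exact hfit.isInfix.trans (List.drop_suffix _ _).isInfix
  · rw [if_neg hF]
    set F := PySem.Chars.find (l.take c.toNat) d.toList with hFdef
    have hF0 : 0 ≤ F := by
      have := PySem.Chars.neg_one_le_find (l.take c.toNat) d.toList
      simp only [← hFdef] at *; omega
    obtain ⟨hpre, hmin⟩ := PySem.Chars.find_spec (sub := d.toList) (s := l.take c.toNat) hF0
    rw [List.drop_take] at hpre
    obtain ⟨hpre', hwid⟩ := List.prefix_take_iff.mp hpre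
    have hfit : F + PySem.Str.len d ≤ c := by
      rw [PySem.Str.len_eq]; omega
    have hFlen : F < (l.length : Int) := by omega
    apply pv_fit_first (pv_occ_sorted text d)
      ((pv_mem_occ text d F).mpr ⟨hF0, hFlen, hpre'⟩) hfit
    intro p hp hplt hpc
    obtain ⟨hp0, hplen, hppre⟩ := (pv_mem_occ text d p).mp hp
    apply hmin p.toNat (by omega)
    rw [List.drop_take]
    exact List.prefix_take_iff.mpr ⟨hppre, by
      rw [PySem.Str.len_eq] at hpc; omega⟩

/-- Invariant relating A's shrinking string to B's integer cut across the delimiter fold. -/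
theorem pv_fold_inv (text : String) (ds : List String) (hds : ∀ d ∈ ds, d.toList ≠ []) :
    ∀ (t : String) (c : Int), 0 ≤ c → c ≤ (text.toList.length : Int) →
      t.toList = text.toList.take c.toNat →
      (ds.foldl (fun t delimiter =>
          match PySem.Str.split? t delimiter with
          | some parts =>
              match PySem.List.pyGet? parts 0 with
              | some piece => piece
              | none => t
          | none => t) t).toList
        = text.toList.take (ds.foldl (fun cut d =>
            pvEarliestFit (pvOccurrences text d) (PySem.Str.len d) cut) c).toNat
      ∧ 0 ≤ ds.foldl (fun cut d =>
            pvEarliestFit (pvOccurrences text d) (PySem.Str.len d) cut) c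
      ∧ ds.foldl (fun cut d =>
            pvEarliestFit (pvOccurrences text d) (PySem.Str.len d) cut) c
          ≤ (text.toList.length : Int) := by
  induction ds with
  | nil =>
      intro t c h0 hle ht
      exact ⟨ht, h0, hle⟩
  | cons d ds ih =>
      intro t c h0 hle ht
      have hd : d.toList ≠ [] := hds d (List.mem_cons_self)
      simp only [List.foldl_cons]
      have hstep : (match PySem.Str.split? t d with
          | some parts =>
              match PySem.List.pyGet? parts 0 with
              | some piece => piece
              | none => t
          | none => t).toList = pvFirstCut d.toList t.toList := pv_stepA hd t
      rw [ht] at hstep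
      have heq := pv_earliest_eq text d hd c h0 hle
      by_cases hF : PySem.Chars.find (text.toList.take c.toNat) d.toList = -1
      · rw [if_pos hF] at heq
        rw [heq]
        have hA : pvFirstCut d.toList (text.toList.take c.toNat)
            = text.toList.take c.toNat := by
          unfold pvFirstCut; rw [if_pos hF]
        exact ih (fun d' hd' => hds d' (List.mem_cons_of_mem _ hd')) _ c h0 hle
          (by rw [hstep, hA])
      · rw [if_neg hF] at heq
        set F := PySem.Chars.find (text.toList.take c.toNat) d.toList with hFdef
        have hF0 : 0 ≤ F := by
          have := PySem.Chars.neg_one_le_find (text.toList.take c.toNat) d.toList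
          simp only [← hFdef] at *; omega
        have hFle : F ≤ (text.toList.length : Int) := by
          have h := PySem.Chars.find_le_length (text.toList.take c.toNat) d.toList
          have h' : (List.length (text.toList.take c.toNat) : Int)
              ≤ (text.toList.length : Int) := by
            simp [List.length_take]
          simp only [← hFdef] at h; omega
        have hA : pvFirstCut d.toList (text.toList.take c.toNat)
            = text.toList.take F.toNat := by
          unfold pvFirstCut
          rw [← hFdef, if_neg hF, List.take_take]
          congr 1
          have hjlen := PySem.Chars.find_le_length (text.toList.take c.toNat) d.toList
          simp only [← hFdef, List.length_take] at hjlen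
          omega
        rw [heq]
        exact ih (fun d' hd' => hds d' (List.mem_cons_of_mem _ hd')) _ F hF0 hFle
          (by rw [hstep, hA])

-- ===== VERDICT (by name: the statement is the Claim_ definition above) =====
theorem get_clean_transcription_spec : Claim_equal_get_clean_transcription := by
  intro text _
  unfold Spec_get_clean_transcription
  apply String.toList_inj.mp
  have hds : ∀ d ∈ (["\nRéférences\n", "\nReferences\n", "\nNotes\n",
      "Apparat critique", "Aparat critique"] : List String), d.toList ≠ [] := by
    decide
  obtain ⟨hA, h0, hle⟩ := pv_fold_inv text _ hds text (PySem.Str.len text)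
    (by rw [PySem.Str.len_eq]; exact_mod_cast Int.natCast_nonneg _)
    (by rw [PySem.Str.len_eq])
    (by rw [PySem.Str.len_eq]; simp)
  simp only [get_clean_transcription, get_clean_transcription_alt]
  rw [hA, PySem.Str.toList_slice, PySem.Chars.slice_eq_listSlice]
  exact (PySem.List.slice_to text.toList h0).symm
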